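-- pv_equiv track=rewrite | github.com/cbassa/tle-generator | tlegenerator/formats.py | number_to_letter
-- ===== SOURCE A (Python) =====
-- def number_to_letter(n):
--     #
--     if n == 0:
--         return ""
--     x = (n - 1) % 24
--     letters = "ABCDEFGHJKLMNPQRSTUVWXYZ"
--     rest = (n - 1) // 24
--     if rest == 0:
--         return letters[x]
--     return number_to_letter(rest) + letters[x]
-- ===== SOURCE B (Python) =====
-- def number_to_letter(n):
--     letters = "ABCDEFGHJKLMNPQRSTUVWXYZ"
--     digits = []
--     while n != 0:
--         n, r = divmod(n - 1, 24)
--         digits.append(r)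
--     return ''.join(letters[d] for d in reversed(digits))
-- ===== Notes on version B (the rewrite author's own statement) =====
-- stated objective: alternative
-- what changed: Instead of recursive string concatenation, B first extracts the base-24 digit indices into a list with a divmod loop (least-significant first), then builds the string once by mapping the reversed digit list through the alphabet and joining.
import Mathlib
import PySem

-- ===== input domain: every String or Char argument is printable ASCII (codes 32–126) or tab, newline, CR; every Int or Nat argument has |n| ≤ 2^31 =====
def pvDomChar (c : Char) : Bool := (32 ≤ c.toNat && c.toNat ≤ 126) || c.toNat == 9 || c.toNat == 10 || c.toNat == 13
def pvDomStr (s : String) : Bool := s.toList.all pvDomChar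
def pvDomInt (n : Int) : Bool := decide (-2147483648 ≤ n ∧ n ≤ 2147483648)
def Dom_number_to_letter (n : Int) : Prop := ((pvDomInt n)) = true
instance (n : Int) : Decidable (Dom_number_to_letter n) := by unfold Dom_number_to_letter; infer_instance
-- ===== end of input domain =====

-- B extracts the base-24 digit indices into a list with a divmod loop, then maps the
-- reversed list through the alphabet and joins once; A builds the string by recursion.

-- ===== PORT A =====
-- A's recursion, on List Char (String.ofList wraps at the end; Lean's String ++ is kernel-opaque).
def lettersA : List Char := "ABCDEFGHJKLMNPQRSTUVWXYZ".toList

def letterDigitsA (n : Int) : List Char :=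
  if n = 0 then []
  else if n < 0 then []   -- Python A recurses forever here; outside Pre_
  else
    let x := PySem.Int.mod (n - 1) 24
    let rest := PySem.Int.floordiv (n - 1) 24
    if rest = 0 then [PySem.List.pyGetD lettersA x ' ']
    else letterDigitsA rest ++ [PySem.List.pyGetD lettersA x ' ']
termination_by n.toNat
decreasing_by
  simp only [PySem.Int.floordiv_eq_ediv_of_pos (a := n - 1) (by omega : (0:Int) < 24)]
  omega

def number_to_letter (n : Int) : String := String.ofList (letterDigitsA n)

-- ===== PORT B =====
def lettersB : List Char := "ABCDEFGHJKLMNPQRSTUVWXYZ".toList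

-- B's while-loop collecting digit indices, least-significant first (Python appends to `digits`).
def digitIndicesB (n : Int) : List Int :=
  if n ≤ 0 then []   -- while-condition is `n != 0`; Python B loops forever for n < 0 (outside Pre_)
  else
    let q := PySem.Int.floordiv (n - 1) 24
    let r := PySem.Int.mod (n - 1) 24
    r :: digitIndicesB q
termination_by n.toNat
decreasing_by
  simp only [PySem.Int.floordiv_eq_ediv_of_pos (a := n - 1) (by omega : (0:Int) < 24)]
  omega

def number_to_letter_alt (n : Int) : String :=
  String.ofList (((digitIndicesB n).reverse).map (fun d => PySem.List.pyGetD lettersB d ' '))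

-- ===== PRECONDITION & SPEC =====
-- Pre_ excludes n < 0, where Python A raises RecursionError (and B loops forever).
def Pre_number_to_letter (n : Int) : Prop := 0 ≤ n
instance (n : Int) : Decidable (Pre_number_to_letter n) := by unfold Pre_number_to_letter; infer_instance
def pvWitness_number_to_letter : Int := 601

def Spec_number_to_letter (n : Int) (out : String) : Prop := out = number_to_letter_alt n
instance (n : Int) (out : String) : Decidable (Spec_number_to_letter n out) := by unfold Spec_number_to_letter; infer_instance

-- ===== CLAIM (what is proved, stated in full; the proofs are below) =====
def Claim_equal_number_to_letter : Prop := ∀ (n : Int), Dom_number_to_letter n → Pre_number_to_letter n → Spec_number_to_letter n (number_to_letter n)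

-- ===== LEMMAS AND PROOFS =====
-- Mapping B's reversed digit list through the alphabet yields exactly A's digit characters.
theorem digitIndicesB_spec (n : Int) :
    ((digitIndicesB n).reverse).map (fun d => PySem.List.pyGetD lettersB d ' ') =
      letterDigitsA n := by
  rw [digitIndicesB, letterDigitsA]
  by_cases h0 : n = 0
  · simp [h0]
  · by_cases hneg : n < 0
    · have : n ≤ 0 := by omega
      simp [h0, hneg, this]
    · have hle : ¬ n ≤ 0 := by omega
      have hd : PySem.Int.floordiv (n - 1) 24 = (n - 1) / 24 :=
        PySem.Int.floordiv_eq_ediv_of_pos (by omega)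
      simp only [h0, hneg, hle, if_false, hd]
      by_cases hq : (n - 1) / 24 = 0
      · simp [hq, digitIndicesB, lettersB, lettersA]
      · have hpos : (0:Int) < (n - 1) / 24 := by omega
        simp only [hq, if_false, List.reverse_cons, List.map_append, List.map_cons,
          List.map_nil]
        rw [digitIndicesB_spec ((n - 1) / 24)]
        simp [lettersB, lettersA]
termination_by n.toNat
decreasing_by omega

-- ===== VERDICT (by name: the statement is the Claim_ definition above) =====
theorem number_to_letter_spec : Claim_equal_number_to_letter := by
  intro n _ _
  unfold Spec_number_to_letter number_to_letter number_to_letter_alt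
  rw [digitIndicesB_spec]
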